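-- pv_equiv track=rewrite | github.com/neuljh/TSP_and_MTSP | MTSP/fixedCity.py | from_breakpoints_to_routes_with_startpoints
-- ===== SOURCE A (Python) =====
-- def from_breakpoints_to_routes_with_startpoints(breakpoints, routes, startpoints):
--     route = [[startpoints[i]] for i in range(len(breakpoints))]
--     output_route = []
--     sum = 0
--     for num in breakpoints:
--         sum += num
--         output_route.append(sum)
--     output_route.insert(0, 0)
--     for i in range(len(route)):
--         routes.remove(route[i][0])
--     for i in range(0, len(output_route) - 1):
--         temp = routes[output_route[i]:output_route[i + 1]]
--         for j in range(len(temp)):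
--             route[i].append(temp[j])
--     return route
-- ===== SOURCE B (Python) =====
-- def from_breakpoints_to_routes_with_startpoints(breakpoints, routes, startpoints):
--     # Count how many earliest occurrences of each startpoint to skip, drop them
--     # in a single pass over routes, then cut the remainder by running offsets.
--     skip = {}
--     for i in range(len(breakpoints)):
--         s = startpoints[i]
--         skip[s] = skip.get(s, 0) + 1
--     remaining = []
--     for x in routes:
--         if skip.get(x, 0) > 0:
--             skip[x] = skip.get(x, 0) - 1
--         else:
--             remaining.append(x)
--     missing = [v for v, c in skip.items() if c > 0]
--     if missing:
--         raise ValueError(f"startpoints not present in routes: {missing}")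
--     result = []
--     pos = 0
--     for b, s in zip(breakpoints, startpoints):
--         nxt = pos + b
--         result.append([s] + remaining[pos:nxt])
--         pos = nxt
--     return result
-- ===== Notes on version B (the rewrite author's own statement) =====
-- stated objective: faster
-- what changed: A removes each startpoint from routes with a separate list.remove scan (O(k*n)) and extends each subroute element by element; B drops all needed earliest occurrences in one counter-driven pass over routes (validating that every startpoint was found) and then builds the subroutes in one running-offset pass over zip(breakpoints, startpoints); B does not mutate the routes argument. Pre_ excludes exactly the inputs where both raise (startpoints shorter than breakpoints: IndexError; a startpoint missing from routes: ValueError).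
import Mathlib
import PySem

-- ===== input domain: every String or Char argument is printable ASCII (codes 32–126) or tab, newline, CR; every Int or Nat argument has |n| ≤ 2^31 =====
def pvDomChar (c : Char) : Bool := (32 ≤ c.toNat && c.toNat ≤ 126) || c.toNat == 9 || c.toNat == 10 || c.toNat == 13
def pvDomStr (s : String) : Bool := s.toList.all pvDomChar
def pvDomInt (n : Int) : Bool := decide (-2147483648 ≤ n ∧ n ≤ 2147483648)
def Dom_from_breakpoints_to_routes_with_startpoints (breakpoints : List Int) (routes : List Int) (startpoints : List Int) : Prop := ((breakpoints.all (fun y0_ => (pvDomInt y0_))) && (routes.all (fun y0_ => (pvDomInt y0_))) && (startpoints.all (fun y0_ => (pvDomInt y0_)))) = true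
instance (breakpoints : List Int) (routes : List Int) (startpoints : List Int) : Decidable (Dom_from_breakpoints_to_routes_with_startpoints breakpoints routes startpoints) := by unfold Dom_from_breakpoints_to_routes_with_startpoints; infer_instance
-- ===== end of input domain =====

-- B replaces A's repeated list.remove scans by one counter-driven pass over routes and one
-- running-offset pass over zip(breakpoints, startpoints) (objective: faster, O(k·n) → O(n)).
-- A mutates its 'routes' argument in place (list.remove); B does not — the equivalence proved
-- here is about the RETURN value only.

-- ===== PORT A =====
def from_breakpoints_to_routes_with_startpoints (breakpoints : List Int) (routes : List Int) (startpoints : List Int) : List (List Int) :=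
  -- route = [[startpoints[i]] for i in range(len(breakpoints))]
  let route : List (List Int) :=
    (PySem.List.pyRange 0 (breakpoints.length : Int)).map
      (fun i => [PySem.List.pyGetD startpoints i 0])
  -- output_route = running sums of breakpoints; then output_route.insert(0, 0)
  let p := breakpoints.foldl (fun (p : List Int × Int) num => (p.1 ++ [p.2 + num], p.2 + num)) ([], 0)
  let output_route := PySem.List.insert p.1 0 0
  -- for i in range(len(route)): routes.remove(route[i][0])
  let routes1 := (PySem.List.pyRange 0 (route.length : Int)).foldl
    (fun rs i => (PySem.List.remove? rs (PySem.List.pyGetD (PySem.List.pyGetD route i []) 0 0)).getD rs) routes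
  -- for i in range(0, len(output_route)-1): temp = routes[...:...]; for j in range(len(temp)): route[i].append(temp[j])
  (PySem.List.pyRange 0 ((output_route.length : Int) - 1)).foldl
    (fun r i =>
      let temp := PySem.List.slice routes1 (some (PySem.List.pyGetD output_route i 0))
                                           (some (PySem.List.pyGetD output_route (i + 1) 0))
      (PySem.List.pyRange 0 ((temp.length : Int))).foldl
        (fun r' j => PySem.List.pySetD r' i (PySem.List.pyGetD r' i [] ++ [PySem.List.pyGetD temp j 0])) r)
    route

-- ===== PORT B =====
def from_breakpoints_to_routes_with_startpoints_alt (breakpoints : List Int) (routes : List Int) (startpoints : List Int) : List (List Int) :=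
  -- skip = {}; for i in range(len(breakpoints)): s = startpoints[i]; skip[s] = skip.get(s, 0) + 1
  let skip : PySem.Dict Int Int :=
    (PySem.List.pyRange 0 (breakpoints.length : Int)).foldl
      (fun (d : PySem.Dict Int Int) i => d.modify (PySem.List.pyGetD startpoints i 0) 0 (fun x => x + 1))
      PySem.Dict.empty
  -- remaining = []; for x in routes: if skip.get(x,0) > 0: skip[x] = skip.get(x,0) - 1 else: remaining.append(x)
  let q := routes.foldl
    (fun (q : PySem.Dict Int Int × List Int) x =>
      if q.1.getD x 0 > 0 then (q.1.modify x 0 (fun v => v - 1), q.2) else (q.1, q.2 ++ [x]))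
    (skip, [])
  let remaining := q.2
  -- 'missing = [v for v,c in skip.items() if c > 0]; if missing: raise ValueError(...)' —
  -- this validation fires only on inputs where some startpoint is absent from routes,
  -- which lie outside Pre_; on the value-producing path it is a no-op
  -- result = []; pos = 0; for b, s in zip(breakpoints, startpoints): nxt = pos + b; result.append([s] + remaining[pos:nxt]); pos = nxt
  ((breakpoints.zip startpoints).foldl
    (fun (p : List (List Int) × Int) bs =>
      let nxt := p.2 + bs.1
      (p.1 ++ [[bs.2] ++ PySem.List.slice remaining (some p.2) (some nxt)], nxt))
    ([], 0)).1

-- ===== PRECONDITION & SPEC =====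
-- Pre_ excludes exactly the inputs where A raises: startpoints shorter than breakpoints
-- (IndexError), or some startpoint occurring more often in startpoints[:len(breakpoints)]
-- than in routes (ValueError in routes.remove).
def Pre_from_breakpoints_to_routes_with_startpoints (breakpoints : List Int) (routes : List Int) (startpoints : List Int) : Prop :=
  breakpoints.length ≤ startpoints.length ∧
  ∀ v ∈ startpoints.take breakpoints.length,
    (startpoints.take breakpoints.length).count v ≤ routes.count v
instance (breakpoints : List Int) (routes : List Int) (startpoints : List Int) : Decidable (Pre_from_breakpoints_to_routes_with_startpoints breakpoints routes startpoints) := by unfold Pre_from_breakpoints_to_routes_with_startpoints; infer_instance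

def pvWitness_from_breakpoints_to_routes_with_startpoints : List Int × List Int × List Int := ([1, 2], [10, 20, 1, 2, 3], [10, 20])

def Spec_from_breakpoints_to_routes_with_startpoints (breakpoints : List Int) (routes : List Int) (startpoints : List Int) (out : List (List Int)) : Prop := out = from_breakpoints_to_routes_with_startpoints_alt breakpoints routes startpoints
instance (breakpoints : List Int) (routes : List Int) (startpoints : List Int) (out : List (List Int)) : Decidable (Spec_from_breakpoints_to_routes_with_startpoints breakpoints routes startpoints out) := by unfold Spec_from_breakpoints_to_routes_with_startpoints; infer_instance

-- ===== CLAIM (what is proved, stated in full; the proofs are below) =====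
def Claim_equal_from_breakpoints_to_routes_with_startpoints : Prop := ∀ (breakpoints : List Int) (routes : List Int) (startpoints : List Int), Dom_from_breakpoints_to_routes_with_startpoints breakpoints routes startpoints → Pre_from_breakpoints_to_routes_with_startpoints breakpoints routes startpoints → Spec_from_breakpoints_to_routes_with_startpoints breakpoints routes startpoints (from_breakpoints_to_routes_with_startpoints breakpoints routes startpoints)

-- ===== LEMMAS AND PROOFS =====

-- "drop, for each value v, the first (c v) occurrences of v" — the common core of both programs
def cFilter (c : Int → Nat) : List Int → List Int
  | [] => []
  | x :: t => if 0 < c x then cFilter (fun v => if v = x then c v - 1 else c v) t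
              else x :: cFilter c t

theorem cFilter_zero (r : List Int) : cFilter (fun _ => 0) r = r := by
  induction r with
  | nil => rfl
  | cons x t ih => simp [cFilter, ih]

-- removing the first occurrence of s commutes with a counter-driven filter
theorem cFilter_erase (c : Int → Nat) (s : Int) (r : List Int) (h : s ∈ r) :
    cFilter c (r.erase s) = cFilter (fun v => if v = s then c v + 1 else c v) r := by
  induction r generalizing c with
  | nil => cases h
  | cons x t ih =>
    by_cases hx : x = s
    · subst hx
      rw [List.erase_cons_head]
      have hpos : 0 < (if x = x then c x + 1 else c x) := by simp
      simp only [cFilter, if_pos hpos]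
      congr 1
      funext v
      by_cases hv : v = x <;> simp [hv]
    · rw [List.erase_cons_tail (by simp [hx])]
      have hst : s ∈ t := by
        rcases List.mem_cons.mp h with h' | h'
        · exact absurd h'.symm hx
        · exact h'
      by_cases hc : 0 < c x
      · have hc' : 0 < (if x = s then c x + 1 else c x) := by rw [if_neg hx]; exact hc
        simp only [cFilter, if_pos hc, if_pos hc', ih _ hst]
        congr 1
        funext v
        by_cases hv : v = x <;> by_cases hv' : v = s <;> simp_all
      · have hc' : ¬ 0 < (if x = s then c x + 1 else c x) := by rw [if_neg hx]; exact hc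
        simp only [cFilter, if_neg hc, if_neg hc', ih _ hst]

-- cFilter only reads the counter at elements of the list
theorem cFilter_congr_mem (r : List Int) : ∀ (c c' : Int → Nat), (∀ v ∈ r, c v = c' v) →
    cFilter c r = cFilter c' r := by
  induction r with
  | nil => intro c c' _; rfl
  | cons x t ih =>
    intro c c' h
    have hx := h x (List.mem_cons_self)
    simp only [cFilter, hx]
    by_cases hc : 0 < c' x
    · rw [if_pos hc, if_pos hc]
      exact ih _ _ (fun v hv => by
        by_cases hvx : v = x <;> simp [hvx, hx, h v (List.mem_cons_of_mem _ hv)])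
    · rw [if_neg hc, if_neg hc, ih _ _ (fun v hv => h v (List.mem_cons_of_mem _ hv))]

-- A's removal loop, as a fold of remove-first over the startpoint prefix
def remEach (ss r : List Int) : List Int :=
  ss.foldl (fun r s => (PySem.List.remove? r s).getD r) r

theorem remEach_eq_cFilter (ss : List Int) (r : List Int) :
    remEach ss r = cFilter (fun v => ss.count v) r := by
  induction ss generalizing r with
  | nil =>
    simpa [remEach] using (cFilter_zero r).symm
  | cons s t ih =>
    by_cases hs : s ∈ r
    · have hrm : PySem.List.remove? r s = some (r.erase s) :=
        PySem.List.remove?_eq_some_erase r s hs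
      have step : remEach (s :: t) r = remEach t (r.erase s) := by
        simp [remEach, hrm]
      rw [step, ih, cFilter_erase _ _ _ hs]
      congr 1
      funext v
      by_cases hv : v = s
      · subst hv; simp [List.count_cons]
      · have hv' : s ≠ v := fun h' => hv h'.symm
        simp [hv, hv']
    · have hrm : PySem.List.remove? r s = none :=
        (PySem.List.remove?_eq_none_iff r s).mpr hs
      have step : remEach (s :: t) r = remEach t r := by
        simp [remEach, hrm]
      rw [step, ih]
      exact cFilter_congr_mem r _ _ (fun v hv => by
        have hv' : s ≠ v := fun h' => hs (h' ▸ hv)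
        simp [hv'])

-- B's one-pass counter filter computes cFilter of the dict's counts
theorem dict_filter_eq_cFilter (t : List Int) :
    ∀ (d : PySem.Dict Int Int) (acc : List Int),
    (t.foldl (fun (q : PySem.Dict Int Int × List Int) x =>
        if q.1.getD x 0 > 0 then (q.1.modify x 0 (fun v => v - 1), q.2) else (q.1, q.2 ++ [x]))
      (d, acc)).2
    = acc ++ cFilter (fun v => (d.getD v 0).toNat) t := by
  induction t with
  | nil => intro d acc; simp [cFilter]
  | cons x t ih =>
    intro d acc
    by_cases hx : d.getD x 0 > 0
    · rw [List.foldl_cons]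
      simp only [hx, if_pos]
      rw [ih]
      have hpos : 0 < (d.getD x 0).toNat := by omega
      simp only [cFilter, if_pos hpos]
      have he : (fun v => ((d.modify x 0 fun v => v - 1).getD v 0).toNat)
          = (fun v => if v = x then (d.getD v 0).toNat - 1 else (d.getD v 0).toNat) := by
        funext v
        rw [PySem.Dict.getD_modify]
        by_cases hv : v = x <;> simp [hv] <;> omega
      rw [he]
    · rw [List.foldl_cons]
      simp only [hx, if_neg, if_false]
      rw [ih]
      have hz : ¬ 0 < (d.getD x 0).toNat := by omega
      simp only [cFilter, if_neg hz, List.append_assoc, List.singleton_append]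

theorem counter_getD (l : List Int) (v : Int) :
    ((l.foldl (fun (d : PySem.Dict Int Int) x => d.modify x 0 (fun x => x + 1)) PySem.Dict.empty).getD v 0).toNat
    = l.count v := by
  rw [PySem.Dict.getD_foldl_modify_add_one]
  simp

-- xs[n] = v for a Nat index is List.set (out of range: both are the identity)
theorem pySetD_natCast {α : Type} (xs : List α) (n : Nat) (v : α) :
    PySem.List.pySetD xs (n : Int) v = xs.set n v := by
  by_cases h : n < xs.length
  · simp [PySem.List.pySetD, PySem.List.pySet?, PySem.List.pyIdx?, h]
  · have he : xs.set n v = xs := List.set_eq_of_length_le (by omega)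
    simp [PySem.List.pySetD, PySem.List.pySet?, PySem.List.pyIdx?, h, he]

-- the inner append-one-by-one loop extends entry n by the whole of t
theorem inner_set (t : List Int) : ∀ (r : List (List Int)) (n : Nat), n < r.length →
    t.foldl (fun r' x => r'.set n (r'.getD n [] ++ [x])) r = r.set n (r.getD n [] ++ t) := by
  induction t with
  | nil =>
    intro r n h
    rw [List.foldl_nil, List.append_nil, List.getD_eq_getElem _ _ h]
    exact (List.set_getElem_self h).symm
  | cons x t ih =>
    intro r n h
    rw [List.foldl_cons, ih _ n (by simpa using h)]
    rw [List.set_set]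
    congr 1
    rw [List.getD_eq_getElem _ _ (by simpa using h)]
    simp [List.getElem_set_self, h]

-- the outer loop over range(k), each step touching only index i, is a map
theorem outer_loop (T : Int → List Int) : ∀ (k : Nat) (r : List (List Int)), k ≤ r.length →
    (PySem.List.pyRange 0 (k : Int)).foldl
      (fun acc i =>
        (PySem.List.pyRange 0 (((T i).length : Int))).foldl
          (fun r' j => PySem.List.pySetD r' i
            (PySem.List.pyGetD r' i [] ++ [PySem.List.pyGetD (T i) j 0])) acc) r
    = (List.range k).map (fun n => r.getD n [] ++ T (n : Int)) ++ r.drop k := by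
  intro k
  induction k with
  | zero =>
    intro r _
    simp [PySem.List.pyRange_zero_natCast]
  | succ k ih =>
    intro r h
    rw [show ((k + 1 : Nat) : Int) = (k : Int) + 1 by push_cast; ring]
    rw [PySem.List.pyRange_one_succ_right (by positivity), List.foldl_append, ih r (by omega)]
    rw [List.foldl_cons, List.foldl_nil]
    rw [PySem.List.foldl_pyRange_zero_pyGetD' (T (k : Int)) 0
      (fun r' x => PySem.List.pySetD r' (k : Int) (PySem.List.pyGetD r' (k : Int) [] ++ [x]))]
    simp only [pySetD_natCast, PySem.List.pyGetD_natCast]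
    have hlen : ((List.range k).map (fun n => r.getD n [] ++ T (n : Int)) ++ r.drop k).length = r.length := by
      simp; omega
    rw [inner_set _ _ k (by omega)]
    have hgd : ((List.range k).map (fun n => r.getD n [] ++ T (n : Int)) ++ r.drop k).getD k [] = r.getD k [] := by
      rw [List.getD_eq_getElem _ _ (by omega), List.getD_eq_getElem _ _ (by omega)]
      rw [List.getElem_append_right (by simp)]
      simp
    rw [hgd]
    rw [List.set_append]
    simp only [List.length_map, List.length_range, Nat.lt_irrefl, if_neg, Nat.sub_self]
    rw [List.drop_eq_getElem_cons (by omega : k < r.length), List.set_cons_zero]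
    rw [List.range_succ, List.map_append]
    simp [List.getD_eq_getElem _ _ (by omega : k < r.length)]

-- characterisation of A's running-sum loop
theorem cumsum_foldl (bps : List Int) : ∀ (acc : List Int) (s : Int),
    bps.foldl (fun (p : List Int × Int) num => (p.1 ++ [p.2 + num], p.2 + num)) (acc, s)
    = (acc ++ (List.range bps.length).map (fun j => s + (bps.take (j + 1)).sum), s + bps.sum) := by
  induction bps with
  | nil => intro acc s; simp
  | cons b t ih =>
    intro acc s
    rw [List.foldl_cons, ih]
    simp only [Prod.mk.injEq]
    constructor
    · rw [List.length_cons, List.range_succ_eq_map, List.map_cons, List.map_map]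
      simp [Function.comp_def, List.take_succ_cons, add_assoc]
    · simp [add_assoc]

-- characterisation of B's running-offset loop over zip(breakpoints, startpoints)
theorem zip_loop (R : List Int) : ∀ (bps sps : List Int), bps.length ≤ sps.length →
    ∀ (acc : List (List Int)) (pos : Int),
    (bps.zip sps).foldl
      (fun (p : List (List Int) × Int) bs =>
        (p.1 ++ [[bs.2] ++ PySem.List.slice R (some p.2) (some (p.2 + bs.1))], p.2 + bs.1))
      (acc, pos)
    = (acc ++ (List.range bps.length).map
        (fun n => [sps.getD n 0] ++ PySem.List.slice R (some (pos + (bps.take n).sum))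
                                                      (some (pos + (bps.take (n + 1)).sum))),
       pos + bps.sum) := by
  intro bps
  induction bps with
  | nil => intro sps h acc pos; simp
  | cons b t ih =>
    intro sps h acc pos
    cases sps with
    | nil => simp at h
    | cons s st =>
      rw [List.zip_cons_cons, List.foldl_cons, ih st (by simpa using h)]
      simp only [Prod.mk.injEq]
      constructor
      · rw [List.length_cons, List.range_succ_eq_map, List.map_cons, List.map_map]
        simp [Function.comp_def, List.take_succ_cons, add_assoc]
      · simp [add_assoc]

-- A's comprehension [[startpoints[i]] for i in range(k)]
theorem route_map (sps : List Int) (k : Nat) (h : k ≤ sps.length) :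
    (PySem.List.pyRange 0 (k : Int)).map (fun i => [PySem.List.pyGetD sps i 0])
    = (sps.take k).map (fun s => [s]) := by
  rw [PySem.List.pyRange_zero_natCast, List.map_map]
  apply List.ext_getElem
  · simp [h]
  · intro i h1 h2
    simp only [List.getElem_map, List.getElem_range, Function.comp_def,
      PySem.List.pyGetD_natCast, List.getElem_take]
    rw [List.getD_eq_getElem _ _ (by simp at h1; omega)]

-- a loop 'for n in range(k): … xs[n] …' is a loop over xs.take k
theorem foldl_range_getD_take {β : Type} (g : β → Int → β) (sps : List Int) (k : Nat)
    (h : k ≤ sps.length) (init : β) :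
    (List.range k).foldl (fun acc n => g acc (sps.getD n 0)) init = (sps.take k).foldl g init := by
  induction k with
  | zero => simp
  | succ k ih =>
    have hk : k < sps.length := by omega
    rw [List.range_succ, List.foldl_append, ih (by omega)]
    have ht : sps.take (k + 1) = sps.take k ++ [sps[k]] := by
      rw [List.take_add_one, List.getElem?_eq_getElem hk]
      rfl
    rw [ht, List.foldl_append]
    simp only [List.foldl_cons, List.foldl_nil]
    rw [List.getD_eq_getElem _ _ hk]

theorem or_eq_map_range (bps : List Int) :
    (0 : Int) :: (List.range bps.length).map (fun j => (0 : Int) + (bps.take (j + 1)).sum)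
    = (List.range (bps.length + 1)).map (fun n => (bps.take n).sum) := by
  rw [List.range_succ_eq_map, List.map_cons, List.map_map]
  simp [Function.comp_def, Nat.succ_eq_add_one]

-- ===== VERDICT =====
theorem from_breakpoints_to_routes_with_startpoints_spec : Claim_equal_from_breakpoints_to_routes_with_startpoints := by
  intro bps routes sps _ hpre
  obtain ⟨h1, -⟩ := hpre
  unfold Spec_from_breakpoints_to_routes_with_startpoints
  simp only [from_breakpoints_to_routes_with_startpoints,
             from_breakpoints_to_routes_with_startpoints_alt]
  rw [route_map sps bps.length h1]
  rw [cumsum_foldl]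
  simp only [PySem.List.insert_zero, List.nil_append]
  rw [or_eq_map_range]
  rw [PySem.List.foldl_pyRange_zero_pyGetD' ((sps.take bps.length).map (fun s => [s])) []
        (fun rs l => (PySem.List.remove? rs (PySem.List.pyGetD l 0 0)).getD rs) routes]
  rw [List.foldl_map]
  simp only [PySem.List.pyGetD_zero_cons]
  rw [show (sps.take bps.length).foldl
        (fun rs s => (PySem.List.remove? rs s).getD rs) routes
      = remEach (sps.take bps.length) routes from rfl]
  rw [remEach_eq_cFilter]
  rw [PySem.List.pyRange_zero_natCast, List.foldl_map]
  simp only [PySem.List.pyGetD_natCast]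
  rw [foldl_range_getD_take (fun (d : PySem.Dict Int Int) x => d.modify x 0 (fun v => v + 1))
        sps bps.length h1]
  rw [dict_filter_eq_cFilter]
  have hneed : (fun v => (((sps.take bps.length).foldl
        (fun (d : PySem.Dict Int Int) x => d.modify x 0 (fun x => x + 1)) PySem.Dict.empty).getD v 0).toNat)
      = (fun v => (sps.take bps.length).count v) := funext (fun v => counter_getD _ v)
  rw [hneed]
  simp only [List.length_map, List.length_range]
  rw [show ((bps.length + 1 : Nat) : Int) - 1 = (bps.length : Int) by push_cast; ring]
  rw [outer_loop _ bps.length _ (by simp [h1])]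
  rw [zip_loop _ bps sps h1]
  simp only [List.nil_append, List.drop_eq_nil_of_le (by simp [h1] : ((sps.take bps.length).map (fun s => [s])).length ≤ bps.length), List.append_nil]
  apply List.map_congr_left
  intro n hn
  have hnk : n < bps.length := List.mem_range.mp hn
  congr 1
  · rw [List.getD_eq_getElem _ _ (by simp; omega), List.getElem_map,
        List.getElem_take, List.getD_eq_getElem _ _ (by omega)]
  · rw [show ((n : Int) + 1) = ((n + 1 : Nat) : Int) by push_cast; ring]
    simp only [PySem.List.pyGetD_natCast]
    rw [PySem.List.getD_map_range _ _ _ _ (by omega),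
        PySem.List.getD_map_range _ _ _ _ (by omega)]
    simp [zero_add]
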